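-- pv_equiv track=rewrite | github.com/YoungChanShin/codingtest | programmers/2020_KAKAO/키패드 누르기/01.py | solution
-- ===== SOURCE A (Python) =====
-- def getDistance(start, destination):
--     if start in (1,3):
--         if destination == 2:
--             return 1
--         elif destination == 5:
--             return 2
--         elif destination == 8:
--             return 3
--         elif destination == 0:
--             return 4
--
--     elif start in (4,6):
--         if destination in (2, 8):
--             return 2
--         elif destination == 5:
--             return 1
--         elif destination == 0:
--             return 3
--
--     elif start in (7,9):
--         if destination == 2:
--             return 3
--         elif destination in (0, 5):
--             return 2
--         elif destination == 8:
--             return 1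
--
--     elif start in ("*", "#"):
--         if destination == 2:
--             return 4
--         elif destination == 5:
--             return 3
--         elif destination == 8:
--             return 2
--         elif destination == 0:
--             return 1
--     elif start in (2,5,8,0):
--         _line = [3,0,0,0,0,1,0,0,2]
--         return abs(_line[start] - _line[destination])
--
-- def solution(numbers, hand):
--     answer = ''
--     right = '#'
--     left = '*'
--     for n in numbers:
--         if n in (1,4,7):
--             answer += 'L'
--             left = n
--             continue
--         elif n in (3,6,9):
--             answer += 'R'
--             right = n
--             continue
--         else:
--             right_distance = getDistance(right, n)
--             left_distance = getDistance(left, n)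
--
--             if right_distance < left_distance:
--                 answer += 'R'
--                 right = n
--                 continue
--             elif left_distance < right_distance:
--                 answer += 'L'
--                 left = n
--                 continue
--             else:
--                 if hand == 'left':
--                     answer += 'L'
--                     left = n
--                 else:
--                     answer += 'R'
--                     right = n
--
--     return answer
-- ===== SOURCE B (Python) =====
-- def solution(numbers, hand):
--     # Stage 1: the keypad as a grid graph; all-pairs key distances by BFS.
--     coords = {1: (0, 0), 2: (0, 1), 3: (0, 2),
--               4: (1, 0), 5: (1, 1), 6: (1, 2),
--               7: (2, 0), 8: (2, 1), 9: (2, 2),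
--               '*': (3, 0), 0: (3, 1), '#': (3, 2)}
--
--     def neighbors(k):
--         r, c = coords[k]
--         return [k2 for k2, (r2, c2) in coords.items()
--                 if abs(r - r2) + abs(c - c2) == 1]
--
--     def bfs(src):
--         dist = {src: 0}
--         frontier = [src]
--         while frontier:
--             nxt = []
--             for u in frontier:
--                 for v in neighbors(u):
--                     if v not in dist:
--                         dist[v] = dist[u] + 1
--                         nxt.append(v)
--             frontier = nxt
--         return dist
--
--     dist = {k: bfs(k) for k in coords}
--
--     # Stage 2: compile the whole task into a finite-state automaton:
--     # a state is the pair of hand positions, the input alphabet is 0..9.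
--     lefts = ['*', 1, 4, 7, 0, 2, 5, 8]
--     rights = ['#', 3, 6, 9, 0, 2, 5, 8]
--     tie = 'L' if hand == 'left' else 'R'
--
--     def choose(L, R, n):
--         if n in (1, 4, 7):
--             return ('L', n, R)
--         if n in (3, 6, 9):
--             return ('R', L, n)
--         dl, dr = dist[L][n], dist[R][n]
--         if dl < dr or (dl == dr and tie == 'L'):
--             return ('L', n, R)
--         return ('R', L, n)
--
--     trans = {(L, R, n): choose(L, R, n)
--              for L in lefts for R in rights for n in range(10)}
--
--     # Stage 3: run the automaton over the input.
--     state = ('*', '#')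
--     out = []
--     for n in numbers:
--         ch, L, R = trans[(state[0], state[1], n)]
--         out.append(ch)
--         state = (L, R)
--     return ''.join(out)
-- ===== Notes on version B (the rewrite author's own statement) =====
-- stated objective: alternative
-- what changed: B compiles the task into a finite-state automaton: it first computes all-pairs keypad distances by BFS on the keypad grid graph, then precomputes a full transition table over the 64 (left,right) hand states and 10 inputs, so the pass over numbers is pure table lookups with no distance computation or case analysis, whereas A decides each press on the fly with an enumerated distance table.
-- outside the precondition, e.g. on solution([7, 2, 8, -1], 'right'): A returns 'LLRR', B raises KeyError; on solution([2, -4], 'left'): A raises TypeError, B raises KeyError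
import Mathlib
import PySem

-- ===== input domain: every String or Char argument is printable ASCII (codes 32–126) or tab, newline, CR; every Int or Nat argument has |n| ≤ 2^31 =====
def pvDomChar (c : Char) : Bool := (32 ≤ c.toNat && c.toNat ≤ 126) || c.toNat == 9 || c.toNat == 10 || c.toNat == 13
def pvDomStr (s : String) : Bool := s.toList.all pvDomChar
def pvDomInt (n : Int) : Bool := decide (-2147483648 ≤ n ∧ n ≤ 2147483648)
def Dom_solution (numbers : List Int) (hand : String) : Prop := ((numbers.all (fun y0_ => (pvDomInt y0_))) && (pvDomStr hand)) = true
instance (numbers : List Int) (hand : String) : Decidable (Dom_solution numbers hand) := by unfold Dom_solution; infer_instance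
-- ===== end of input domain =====

-- B re-solves the task as a compiled finite-state automaton: all-pairs keypad
-- distances by BFS on the keypad grid graph, a precomputed transition table over
-- all (left,right) hand states, then a loop of pure table lookups.

-- ===== PORT A =====
-- A hand position in the Python code is either the string '*' or '#' or an int key.
inductive PKey
  | star
  | hash
  | num (n : Int)
deriving DecidableEq, Repr

def pyLine : List Int := [3, 0, 0, 0, 0, 1, 0, 0, 2]

-- getDistance; `none` is Python's fall-through `return None` (or an IndexError on
-- `_line[...]`), on which the caller's `<` comparison raises TypeError — outside Pre_.
def getDistance (start : PKey) (destination : Int) : Option Int :=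
  match start with
  | .num s =>
    if s = 1 ∨ s = 3 then
      if destination = 2 then some 1
      else if destination = 5 then some 2
      else if destination = 8 then some 3
      else if destination = 0 then some 4
      else none
    else if s = 4 ∨ s = 6 then
      if destination = 2 ∨ destination = 8 then some 2
      else if destination = 5 then some 1
      else if destination = 0 then some 3
      else none
    else if s = 7 ∨ s = 9 then
      if destination = 2 then some 3
      else if destination = 0 ∨ destination = 5 then some 2
      else if destination = 8 then some 1
      else none
    else if s = 2 ∨ s = 5 ∨ s = 8 ∨ s = 0 then
      match PySem.List.pyGet? pyLine s, PySem.List.pyGet? pyLine destination with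
      | some x, some y => some |x - y|
      | _, _ => none
    else none
  | .star | .hash =>
    if destination = 2 then some 4
    else if destination = 5 then some 3
    else if destination = 8 then some 2
    else if destination = 0 then some 1
    else none

def solutionStep (hand : String) (st : String × PKey × PKey) (n : Int) : String × PKey × PKey :=
  let answer := st.1
  let left := st.2.1
  let right := st.2.2
  if n = 1 ∨ n = 4 ∨ n = 7 then (answer ++ "L", PKey.num n, right)
  else if n = 3 ∨ n = 6 ∨ n = 9 then (answer ++ "R", left, PKey.num n)
  else
    match getDistance right n, getDistance left n with
    | some right_distance, some left_distance =>
      if right_distance < left_distance then (answer ++ "R", left, PKey.num n)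
      else if left_distance < right_distance then (answer ++ "L", PKey.num n, right)
      else if hand = "left" then (answer ++ "L", PKey.num n, right)
      else (answer ++ "R", left, PKey.num n)
    | _, _ => (answer, left, right)  -- Python raises TypeError here; excluded by Pre_

def solution (numbers : List Int) (hand : String) : String :=
  (numbers.foldl (solutionStep hand) ("", PKey.star, PKey.hash)).1

-- ===== PORT B =====
-- Stage 1 of Source B: the keypad as a dict key ↦ (row, col); same key type PKey.
def bCoords : PySem.Dict PKey (Int × Int) :=
  PySem.Dict.ofList
    [(.num 1, (0, 0)), (.num 2, (0, 1)), (.num 3, (0, 2)),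
     (.num 4, (1, 0)), (.num 5, (1, 1)), (.num 6, (1, 2)),
     (.num 7, (2, 0)), (.num 8, (2, 1)), (.num 9, (2, 2)),
     (.star, (3, 0)), (.num 0, (3, 1)), (.hash, (3, 2))]

-- neighbors(k): coords[k] never raises (every caller passes a keypad key); the
-- [] branch is the unreachable KeyError case.
def bNeighbors (k : PKey) : List PKey :=
  match bCoords.get? k with
  | some (r, c) =>
      (bCoords.items.filter (fun p => |r - p.2.1| + |c - p.2.2| == 1)).map (·.1)
  | none => []

-- bfs's `while frontier:` loop, with fuel: 13 exceeds the number of keys, hence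
-- the number of BFS levels, so the fuel never runs out before the frontier
-- empties. dist[u] inside the loop is always a present key: ported as getD u 0.
def bfsLoop : Nat → PySem.Dict PKey Int → List PKey → PySem.Dict PKey Int
  | 0, dist, _ => dist
  | fuel + 1, dist, frontier =>
    if frontier = [] then dist
    else
      let st := frontier.foldl
        (fun (st : PySem.Dict PKey Int × List PKey) u =>
          (bNeighbors u).foldl
            (fun (st : PySem.Dict PKey Int × List PKey) v =>
              if st.1.contains v then st
              else (st.1.insert v (st.1.getD u 0 + 1), st.2 ++ [v]))
            st)
        (dist, ([] : List PKey))
      bfsLoop fuel st.1 st.2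

def bBfs (src : PKey) : PySem.Dict PKey Int :=
  bfsLoop 13 (PySem.Dict.ofList [(src, 0)]) [src]

-- dist = {k: bfs(k) for k in coords}: a comprehension over the 12 distinct keys.
def bDist : PySem.Dict PKey (PySem.Dict PKey Int) :=
  PySem.Dict.ofList (bCoords.keys.map (fun k => (k, bBfs k)))

def bLefts : List PKey :=
  [.star, .num 1, .num 4, .num 7, .num 0, .num 2, .num 5, .num 8]
def bRights : List PKey :=
  [.hash, .num 3, .num 6, .num 9, .num 0, .num 2, .num 5, .num 8]

-- choose(L, R, n); dist[L][n] is only evaluated on keys the table build supplies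
-- (L ∈ lefts, R ∈ rights, 0 ≤ n ≤ 9), all present: ported as getD.
def bChoose (tie : Char) (L R : PKey) (n : Int) : Char × PKey × PKey :=
  if n = 1 ∨ n = 4 ∨ n = 7 then ('L', .num n, R)
  else if n = 3 ∨ n = 6 ∨ n = 9 then ('R', L, .num n)
  else
    let dl := (bDist.getD L PySem.Dict.empty).getD (.num n) 0
    let dr := (bDist.getD R PySem.Dict.empty).getD (.num n) 0
    if dl < dr ∨ (dl = dr ∧ tie = 'L') then ('L', .num n, R)
    else ('R', L, .num n)

-- the dict comprehension building trans: all keys distinct, so the dict is the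
-- enumeration list itself in order.
def bTrans (tie : Char) : PySem.Dict (PKey × PKey × Int) (Char × PKey × PKey) :=
  PySem.Dict.ofList
    (bLefts.flatMap fun L => bRights.flatMap fun R =>
      (PySem.List.pyRange 0 10 1).map fun n => ((L, R, n), bChoose tie L R n))

-- Stage 3 loop body: pure automaton transition. The `none` branch is Python's
-- KeyError on a key outside the table; excluded by Pre_.
def altStep (trans : PySem.Dict (PKey × PKey × Int) (Char × PKey × PKey))
    (st : List Char × PKey × PKey) (n : Int) : List Char × PKey × PKey :=
  match trans.get? (st.2.1, st.2.2, n) with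
  | some (ch, L, R) => (st.1 ++ [ch], L, R)
  | none => st

def solution_alt (numbers : List Int) (hand : String) : String :=
  let tie := if hand = "left" then 'L' else 'R'
  let trans := bTrans tie
  String.ofList (numbers.foldl (altStep trans) ([], PKey.star, PKey.hash)).1

-- ===== PRECONDITION & SPEC =====
-- Pre_ restricts to the keypad's natural domain: every pressed number is a key 0..9.
-- Outside it A almost always raises TypeError (getDistance returns None) and B
-- raises KeyError; on the rare out-of-range inputs where A still returns, it does
-- so through accidental negative-index wraparound of `_line[destination]`,
-- behaviour B does not reproduce (B raises KeyError there).
def Pre_solution (numbers : List Int) (hand : String) : Prop :=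
  ∀ n ∈ numbers, 0 ≤ n ∧ n ≤ 9
instance (numbers : List Int) (hand : String) : Decidable (Pre_solution numbers hand) := by
  unfold Pre_solution; infer_instance

def pvWitness_solution : List Int × String := ([1, 3, 4, 5, 8, 2, 1, 4, 5, 9, 5], "right")

def Spec_solution (numbers : List Int) (hand : String) (out : String) : Prop := out = solution_alt numbers hand
instance (numbers : List Int) (hand : String) (out : String) : Decidable (Spec_solution numbers hand out) := by unfold Spec_solution; infer_instance

-- ===== CLAIM (what is proved, stated in full; the proofs are below) =====
def Claim_equal_solution : Prop := ∀ (numbers : List Int) (hand : String), Dom_solution numbers hand → Pre_solution numbers hand → Spec_solution numbers hand (solution numbers hand)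

-- ===== LEMMAS AND PROOFS =====

-- the BFS distance table, evaluated once to a literal
theorem bDist_eq : bDist = PySem.Dict.mk [
    (.num 1, PySem.Dict.mk [(.num 1, 0), (.num 2, 1), (.num 4, 1), (.num 3, 2), (.num 5, 2), (.num 7, 2), (.num 6, 3), (.num 8, 3), (.star, 3), (.num 9, 4), (.num 0, 4), (.hash, 5)]),
    (.num 2, PySem.Dict.mk [(.num 2, 0), (.num 1, 1), (.num 3, 1), (.num 5, 1), (.num 4, 2), (.num 6, 2), (.num 8, 2), (.num 7, 3), (.num 9, 3), (.num 0, 3), (.star, 4), (.hash, 4)]),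
    (.num 3, PySem.Dict.mk [(.num 3, 0), (.num 2, 1), (.num 6, 1), (.num 1, 2), (.num 5, 2), (.num 9, 2), (.num 4, 3), (.num 8, 3), (.hash, 3), (.num 7, 4), (.num 0, 4), (.star, 5)]),
    (.num 4, PySem.Dict.mk [(.num 4, 0), (.num 1, 1), (.num 5, 1), (.num 7, 1), (.num 2, 2), (.num 6, 2), (.num 8, 2), (.star, 2), (.num 3, 3), (.num 9, 3), (.num 0, 3), (.hash, 4)]),
    (.num 5, PySem.Dict.mk [(.num 5, 0), (.num 2, 1), (.num 4, 1), (.num 6, 1), (.num 8, 1), (.num 1, 2), (.num 3, 2), (.num 7, 2), (.num 9, 2), (.num 0, 2), (.star, 3), (.hash, 3)]),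
    (.num 6, PySem.Dict.mk [(.num 6, 0), (.num 3, 1), (.num 5, 1), (.num 9, 1), (.num 2, 2), (.num 4, 2), (.num 8, 2), (.hash, 2), (.num 1, 3), (.num 7, 3), (.num 0, 3), (.star, 4)]),
    (.num 7, PySem.Dict.mk [(.num 7, 0), (.num 4, 1), (.num 8, 1), (.star, 1), (.num 1, 2), (.num 5, 2), (.num 9, 2), (.num 0, 2), (.num 2, 3), (.num 6, 3), (.hash, 3), (.num 3, 4)]),
    (.num 8, PySem.Dict.mk [(.num 8, 0), (.num 5, 1), (.num 7, 1), (.num 9, 1), (.num 0, 1), (.num 2, 2), (.num 4, 2), (.num 6, 2), (.star, 2), (.hash, 2), (.num 1, 3), (.num 3, 3)]),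
    (.num 9, PySem.Dict.mk [(.num 9, 0), (.num 6, 1), (.num 8, 1), (.hash, 1), (.num 3, 2), (.num 5, 2), (.num 7, 2), (.num 0, 2), (.num 2, 3), (.num 4, 3), (.star, 3), (.num 1, 4)]),
    (.star, PySem.Dict.mk [(.star, 0), (.num 7, 1), (.num 0, 1), (.num 4, 2), (.num 8, 2), (.hash, 2), (.num 1, 3), (.num 5, 3), (.num 9, 3), (.num 2, 4), (.num 6, 4), (.num 3, 5)]),
    (.num 0, PySem.Dict.mk [(.num 0, 0), (.num 8, 1), (.star, 1), (.hash, 1), (.num 5, 2), (.num 7, 2), (.num 9, 2), (.num 2, 3), (.num 4, 3), (.num 6, 3), (.num 1, 4), (.num 3, 4)]),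
    (.hash, PySem.Dict.mk [(.hash, 0), (.num 9, 1), (.num 0, 1), (.num 6, 2), (.num 8, 2), (.star, 2), (.num 3, 3), (.num 5, 3), (.num 7, 3), (.num 2, 4), (.num 4, 4), (.num 1, 5)])] := by rfl

-- the enumeration list behind the trans dict comprehension
def bPairs (tie : Char) : List ((PKey × PKey × Int) × (Char × PKey × PKey)) :=
  bLefts.flatMap fun L => bRights.flatMap fun R =>
    (PySem.List.pyRange 0 10 1).map fun n => ((L, R, n), bChoose tie L R n)

set_option maxRecDepth 100000 in
theorem map_fst_bPairs (tie : Char) :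
    (bPairs tie).map Prod.fst = bLefts ×ˢ (bRights ×ˢ PySem.List.pyRange 0 10 1) := by rfl

theorem keys_nodup (tie : Char) : ((bPairs tie).map Prod.fst).Nodup := by
  rw [map_fst_bPairs]
  exact List.Nodup.product (by decide) (List.Nodup.product (by decide) (by decide))

theorem items_bTrans (tie : Char) : (bTrans tie).items = bPairs tie := by
  have h := PySem.Dict.items_foldl_insert_fresh (bPairs tie) Prod.fst Prod.snd
    PySem.Dict.empty (fun a _ => by simp) (keys_nodup tie)
  simpa using h

theorem get?_bTrans (tie : Char) (L R : PKey) (n : Int) (hmL : L ∈ bLefts)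
    (hmR : R ∈ bRights) (hn : n ∈ PySem.List.pyRange 0 10 1) :
    (bTrans tie).get? (L, R, n) = some (bChoose tie L R n) := by
  apply PySem.Dict.get?_of_mem_items
  · rw [items_bTrans]
    simp only [bPairs, List.mem_flatMap, List.mem_map]
    exact ⟨L, hmL, R, hmR, n, hn, rfl⟩
  · exact PySem.Dict.nodup_keys_ofList _

-- the finite core: for both tie-break values, every automaton state and key,
-- A's step started on an empty answer produces Source B's choose(L, R, n).
set_option maxRecDepth 100000 in
set_option maxHeartbeats 1000000 in
theorem choice_core : ∀ t ∈ [true, false], ∀ L ∈ bLefts, ∀ R ∈ bRights,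
    ∀ n ∈ PySem.List.pyRange 0 10 1,
    (let a := solutionStep (if t then "left" else "right") ("", L, R) n
     let c := bChoose (if t then 'L' else 'R') L R n
     a.1.toList == [c.1] && a.2.1 == c.2.1 && a.2.2 == c.2.2
       && bLefts.contains c.2.1 && bRights.contains c.2.2) = true := by
  simp only [bChoose, bDist_eq]
  decide

-- A's step is insensitive to which non-"left" string hand is
theorem stepA_hand (hand : String) (h : hand ≠ "left") (st : String × PKey × PKey) (n : Int) :
    solutionStep hand st n = solutionStep "right" st n := by
  unfold solutionStep
  simp only [if_neg h, if_neg (by decide : ¬("right" : String) = "left")]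

-- A's step appends to the accumulated answer
theorem stepA_shift (hand : String) (s : String) (L R : PKey) (n : Int) :
    (solutionStep hand (s, L, R) n).1.toList
        = s.toList ++ (solutionStep hand ("", L, R) n).1.toList
      ∧ (solutionStep hand (s, L, R) n).2 = (solutionStep hand ("", L, R) n).2 := by
  unfold solutionStep
  by_cases h1 : n = 1 ∨ n = 4 ∨ n = 7
  · simp [h1, String.toList_append]
  by_cases h2 : n = 3 ∨ n = 6 ∨ n = 9
  · simp [h1, h2, String.toList_append]
  simp only [if_neg h1, if_neg h2]
  cases getDistance R n <;> cases getDistance L n <;> dsimp only <;>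
    (try split_ifs) <;> simp [String.toList_append]

-- B's step appends to the accumulated answer
theorem stepB_shift (tr : PySem.Dict (PKey × PKey × Int) (Char × PKey × PKey))
    (l : List Char) (L R : PKey) (n : Int) :
    (altStep tr (l, L, R) n).1 = l ++ (altStep tr ([], L, R) n).1
      ∧ (altStep tr (l, L, R) n).2 = (altStep tr ([], L, R) n).2 := by
  unfold altStep
  cases h : tr.get? (L, R, n) with
  | none => simp
  | some v => obtain ⟨ch, Ln, Rn⟩ := v; simp

def StRel (sa : String × PKey × PKey) (sb : List Char × PKey × PKey) : Prop :=
  sa.1.toList = sb.1 ∧ sa.2.1 = sb.2.1 ∧ sa.2.2 = sb.2.2 ∧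
    sa.2.1 ∈ bLefts ∧ sa.2.2 ∈ bRights

theorem step_rel (hand : String) (sa : String × PKey × PKey) (sb : List Char × PKey × PKey)
    (n : Int) (hrel : StRel sa sb) (h0 : 0 ≤ n) (h9 : n ≤ 9) :
    StRel (solutionStep hand sa n)
      (altStep (bTrans (if hand = "left" then 'L' else 'R')) sb n) := by
  obtain ⟨hans, hL, hR, hmL, hmR⟩ := hrel
  obtain ⟨s, L, R⟩ := sa
  obtain ⟨l, L', R'⟩ := sb
  simp only at hans hL hR hmL hmR
  subst hL hR
  obtain ⟨t, hhand, htie⟩ :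
      ∃ t : Bool, solutionStep hand = solutionStep (if t then "left" else "right") ∧
        (if hand = "left" then 'L' else 'R') = (if t then 'L' else 'R') := by
    by_cases hh : hand = "left"
    · exact ⟨true, by rw [hh]; rfl, by rw [if_pos hh]; rfl⟩
    · exact ⟨false, funext fun st => funext fun m => stepA_hand hand hh st m,
        by rw [if_neg hh]; rfl⟩
  rw [hhand, htie]
  have hn : n ∈ PySem.List.pyRange 0 10 1 := by
    simp [PySem.List.mem_pyRange_one]; omega
  have hok := choice_core t (by cases t <;> simp) L hmL R hmR n hn
  have hget := get?_bTrans (if t then 'L' else 'R') L R n hmL hmR hn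
  rcases hch : bChoose (if t then 'L' else 'R') L R n with ⟨ch, Ln, Rn⟩
  rw [hch] at hget hok
  simp only [Bool.and_eq_true, beq_iff_eq, List.contains_eq_mem, decide_eq_true_eq] at hok
  obtain ⟨⟨⟨⟨h1, h2⟩, h3⟩, h4⟩, h5⟩ := hok
  have hBe : altStep (bTrans (if t then 'L' else 'R')) ([], L, R) n = ([ch], Ln, Rn) := by
    unfold altStep; rw [hget]; rfl
  have hBs := stepB_shift (bTrans (if t then 'L' else 'R')) l L R n
  rw [hBe] at hBs
  have hAs := stepA_shift (if t then "left" else "right") s L R n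
  have hA2 : (solutionStep (if t then "left" else "right") (s, L, R) n).2 = (Ln, Rn) := by
    rw [hAs.2]; exact Prod.ext h2 h3
  have hB2 : (altStep (bTrans (if t then 'L' else 'R')) (l, L, R) n).2 = (Ln, Rn) := hBs.2
  refine ⟨?_, ?_, ?_, ?_, ?_⟩
  · rw [hAs.1, h1, hBs.1, hans]
  · rw [hA2, hB2]
  · rw [hA2, hB2]
  · rw [hA2]; exact h4
  · rw [hA2]; exact h5

set_option maxRecDepth 100000 in
theorem foldl_rel (hand : String) (numbers : List Int)
    (hpre : ∀ n ∈ numbers, 0 ≤ n ∧ n ≤ 9) (sa : String × PKey × PKey)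
    (sb : List Char × PKey × PKey) (hrel : StRel sa sb) :
    StRel (numbers.foldl (solutionStep hand) sa)
      (numbers.foldl (altStep (bTrans (if hand = "left" then 'L' else 'R'))) sb) := by
  induction numbers generalizing sa sb with
  | nil => exact hrel
  | cons n ns ih =>
    have hn := hpre n (List.mem_cons_self ..)
    rw [List.foldl_cons, List.foldl_cons]
    exact ih (fun m hm => hpre m (List.mem_cons_of_mem _ hm)) _ _
      (step_rel hand sa sb n hrel hn.1 hn.2)

-- ===== VERDICT (by name: the statement is the Claim_ definition above) =====
set_option maxRecDepth 10000 in
theorem solution_spec : Claim_equal_solution := by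
  intro numbers hand _ hpre
  unfold Spec_solution
  show (numbers.foldl (solutionStep hand) ("", PKey.star, PKey.hash)).1
      = String.ofList
          (numbers.foldl (altStep (bTrans (if hand = "left" then 'L' else 'R')))
            ([], PKey.star, PKey.hash)).1
  have h := foldl_rel hand numbers hpre ("", PKey.star, PKey.hash)
    ([], PKey.star, PKey.hash) ⟨by decide, rfl, rfl, by decide, by decide⟩
  rw [← h.1, String.ofList_toList]
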